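-- pv_equiv track=rewrite | github.com/garethellis0/spotify_ripper | src/Util.py | html_to_ascii
-- ===== SOURCE A (Python) =====
-- def html_to_ascii(s):
--     """
--     Converts html encoding to ascii in a String and returns a new String
--
--     :param s: A String
--     :return: A new String replacing all html encoding with ascii representation
--     """
--     html_codes = [
--         ["'", '&#39;'],
--         ['"', '&quot;'],
--         ['>', '&gt;'],
--         ['<', '&lt;'],
--         ['&', '&amp;']
--     ]
--     for code in html_codes:
--         s = s.replace(code[1], code[0])
--
--     return s
-- ===== SOURCE B (Python) =====
-- import re
--
-- _ENTITIES = {'&#39;': "'", '&quot;': '"', '&gt;': '>', '&lt;': '<', '&amp;': '&'}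
-- _ENTITY_RX = re.compile('&#39;|&quot;|&gt;|&lt;|&amp;')
--
--
-- def html_to_ascii(s):
--     """
--     Converts html encoding to ascii in a String and returns a new String
--
--     :param s: A String
--     :return: A new String replacing all html encoding with ascii representation
--     """
--     return _ENTITY_RX.sub(lambda m: _ENTITIES[m.group(0)], s)
-- ===== Notes on version B (the rewrite author's own statement) =====
-- stated objective: idiomatic
-- what changed: Replaces five sequential full-string .replace passes by a precompiled regex alternation plus an entity->char dict, doing all substitutions in one left-to-right scan with re.sub.
import Mathlib
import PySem

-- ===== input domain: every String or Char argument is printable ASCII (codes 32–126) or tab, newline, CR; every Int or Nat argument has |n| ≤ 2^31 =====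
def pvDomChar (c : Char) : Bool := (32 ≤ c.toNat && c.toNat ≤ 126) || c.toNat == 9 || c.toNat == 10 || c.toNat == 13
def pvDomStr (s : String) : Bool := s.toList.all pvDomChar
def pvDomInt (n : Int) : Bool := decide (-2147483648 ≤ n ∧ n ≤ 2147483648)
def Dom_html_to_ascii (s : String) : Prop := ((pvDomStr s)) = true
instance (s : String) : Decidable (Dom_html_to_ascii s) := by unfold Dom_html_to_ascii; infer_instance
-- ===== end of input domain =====

-- B replaces A's five sequential full-string replace passes by a single left-to-right scan
-- (in Python: a precompiled regex alternation + an entity→char dict with re.sub); objective: idiomatic one-pass rewrite.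

-- ===== PORT A =====
-- A: html_codes = [[char, code], …]; for code in html_codes: s = s.replace(code[1], code[0]).
def html_to_ascii (s : String) : String :=
  let html_codes : List (String × String) :=
    [("'", "&#39;"), ("\"", "&quot;"), (">", "&gt;"), ("<", "&lt;"), ("&", "&amp;")]
  html_codes.foldl (fun s code => PySem.Str.replace s code.2 code.1) s

-- ===== PORT B =====
-- B: re.sub with the alternation '&#39;|&quot;|&gt;|&lt;|&amp;' scans left to right once,
-- trying the alternatives in order at each position; the dict lookup gives the emitted char.
def scanEntities : List Char → List Char
  | '&'::'#'::'3'::'9'::';'::t => '\'' :: scanEntities t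
  | '&'::'q'::'u'::'o'::'t'::';'::t => '"' :: scanEntities t
  | '&'::'g'::'t'::';'::t => '>' :: scanEntities t
  | '&'::'l'::'t'::';'::t => '<' :: scanEntities t
  | '&'::'a'::'m'::'p'::';'::t => '&' :: scanEntities t
  | c :: t => c :: scanEntities t
  | [] => []

def html_to_ascii_alt (s : String) : String := String.ofList (scanEntities s.toList)

-- ===== PRECONDITION & SPEC =====
def Spec_html_to_ascii (s : String) (out : String) : Prop := out = html_to_ascii_alt s
instance (s : String) (out : String) : Decidable (Spec_html_to_ascii s out) := by unfold Spec_html_to_ascii; infer_instance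

-- ===== CLAIM (what is proved, stated in full; the proofs are below) =====
def Claim_equal_html_to_ascii : Prop := ∀ (s : String), Dom_html_to_ascii s → Spec_html_to_ascii s (html_to_ascii s)

-- ===== LEMMAS AND PROOFS =====

-- Structural model of Python str.replace (for old ≠ []), proved equal to PySem.Chars.replace below.
def repPy (old new : List Char) : List Char → List Char
  | [] => []
  | c :: t =>
    if old.isPrefixOf (c :: t) then new ++ repPy old new (List.drop (old.length - 1) t)
    else c :: repPy old new t
termination_by l => l.length
decreasing_by
  all_goals simp

lemma repPy_nil (old new : List Char) : repPy old new [] = [] := by simp [repPy]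

lemma repPy_cons (old new : List Char) (c : Char) (t : List Char) :
    repPy old new (c :: t) =
      if old.isPrefixOf (c :: t) then new ++ repPy old new (List.drop (old.length - 1) t)
      else c :: repPy old new t := by
  rw [repPy]

lemma repPy_pos (old new : List Char) (c : Char) (t : List Char)
    (h : old.isPrefixOf (c :: t) = true) :
    repPy old new (c :: t) = new ++ repPy old new (List.drop (old.length - 1) t) := by
  rw [repPy_cons, if_pos h]

lemma repPy_neg (old new : List Char) (c : Char) (t : List Char)
    (h : old.isPrefixOf (c :: t) = false) :
    repPy old new (c :: t) = c :: repPy old new t := by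
  rw [repPy_cons, if_neg (by simp [h])]

lemma go_eq (old new : List Char) (hne : old ≠ []) :
    ∀ fuel l acc, l.length ≤ fuel →
      PySem.Chars.replace.go old new fuel l acc = acc.reverse ++ repPy old new l := by
  intro fuel
  induction fuel with
  | zero =>
    intro l acc hl
    have : l = [] := List.eq_nil_of_length_eq_zero (Nat.le_zero.mp hl)
    subst this
    simp [PySem.Chars.replace.go, repPy_nil]
  | succ n ih =>
    intro l acc hl
    cases l with
    | nil => simp [PySem.Chars.replace.go, repPy_nil]
    | cons c t =>
      rw [PySem.Chars.replace.go]
      by_cases hp : old.isPrefixOf (c :: t)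
      · rw [if_pos hp]
        obtain ⟨k, hk⟩ : ∃ k, old.length = k + 1 := by
          cases old with
          | nil => exact absurd rfl hne
          | cons a o => exact ⟨o.length, rfl⟩
        have hdrop : List.drop old.length (c :: t) = List.drop k t := by
          rw [hk]; simp
        have hlen : (List.drop k t).length ≤ n := by
          simp only [List.length_drop]
          simp at hl
          omega
        rw [hdrop, ih _ _ hlen, repPy_cons, if_pos hp]
        have : old.length - 1 = k := by omega
        rw [this]
        simp
      · rw [if_neg hp, ih t (c :: acc) (by simp at hl ⊢; omega), repPy_cons, if_neg hp]
        simp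

lemma replace_eq_repPy (s old new : List Char) (hne : old ≠ []) :
    PySem.Chars.replace s old new = repPy old new s := by
  rw [PySem.Chars.replace, if_neg (by simp [hne]), go_eq old new hne s.length s [] le_rfl]
  simp

-- a prefix Q avoiding the replacement char r survives repPy o [r] only if it was already a prefix
lemma not_prefix_repPy (o : List Char) (r : Char) :
    ∀ n X Q, X.length ≤ n → r ∉ Q → ¬ Q <+: X → ¬ Q <+: repPy o [r] X := by
  intro n
  induction n with
  | zero =>
    intro X Q hX hr hQ
    have : X = [] := List.eq_nil_of_length_eq_zero (Nat.le_zero.mp hX)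
    subst this
    simpa [repPy_nil] using hQ
  | succ n ih =>
    intro X Q hX hr hQ
    cases X with
    | nil => simpa [repPy_nil] using hQ
    | cons c t =>
      rw [repPy_cons]
      by_cases hp : o.isPrefixOf (c :: t)
      · rw [if_pos hp]
        intro hpre
        cases Q with
        | nil => exact hQ (List.nil_prefix)
        | cons q Q' =>
          rw [List.singleton_append, List.cons_prefix_cons] at hpre
          exact hr (by simp [hpre.1])
      · rw [if_neg hp]
        intro hpre
        cases Q with
        | nil => exact hQ (List.nil_prefix)
        | cons q Q' =>
          rw [List.cons_prefix_cons] at hpre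
          obtain ⟨rfl, hpre'⟩ := hpre
          have hQ' : ¬ Q' <+: t := by
            intro h
            exact hQ (List.cons_prefix_cons.mpr ⟨rfl, h⟩)
          exact ih t Q' (by simp at hX ⊢; omega) (fun h => hr (List.mem_cons_of_mem _ h)) hQ' hpre'

-- the five passes of A
def r1 (l : List Char) : List Char := repPy ['&','#','3','9',';'] ['\''] l
def r2 (l : List Char) : List Char := repPy ['&','q','u','o','t',';'] ['"'] l
def r3 (l : List Char) : List Char := repPy ['&','g','t',';'] ['>'] l
def r4 (l : List Char) : List Char := repPy ['&','l','t',';'] ['<'] l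
def r5 (l : List Char) : List Char := repPy ['&','a','m','p',';'] ['&'] l

-- single-step facts, conditions closed by rfl on the literal heads
lemma r1_match (t : List Char) : r1 ('&'::'#'::'3'::'9'::';'::t) = '\'' :: r1 t := by
  rw [r1, repPy_pos ['&','#','3','9',';'] ['\''] '&' ('#'::'3'::'9'::';'::t) rfl]; rfl
lemma r2_match (t : List Char) : r2 ('&'::'q'::'u'::'o'::'t'::';'::t) = '"' :: r2 t := by
  rw [r2, repPy_pos ['&','q','u','o','t',';'] ['"'] '&' ('q'::'u'::'o'::'t'::';'::t) rfl]; rfl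
lemma r3_match (t : List Char) : r3 ('&'::'g'::'t'::';'::t) = '>' :: r3 t := by
  rw [r3, repPy_pos ['&','g','t',';'] ['>'] '&' ('g'::'t'::';'::t) rfl]; rfl
lemma r4_match (t : List Char) : r4 ('&'::'l'::'t'::';'::t) = '<' :: r4 t := by
  rw [r4, repPy_pos ['&','l','t',';'] ['<'] '&' ('l'::'t'::';'::t) rfl]; rfl
lemma r5_match (t : List Char) : r5 ('&'::'a'::'m'::'p'::';'::t) = '&' :: r5 t := by
  rw [r5, repPy_pos ['&','a','m','p',';'] ['&'] '&' ('a'::'m'::'p'::';'::t) rfl]; rfl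

lemma r1_pass (c : Char) (t : List Char) (h : List.isPrefixOf ['&','#','3','9',';'] (c :: t) = false) :
    r1 (c :: t) = c :: r1 t := by rw [r1, repPy_neg _ _ _ _ h]; rfl
lemma r2_pass (c : Char) (t : List Char) (h : List.isPrefixOf ['&','q','u','o','t',';'] (c :: t) = false) :
    r2 (c :: t) = c :: r2 t := by rw [r2, repPy_neg _ _ _ _ h]; rfl
lemma r3_pass (c : Char) (t : List Char) (h : List.isPrefixOf ['&','g','t',';'] (c :: t) = false) :
    r3 (c :: t) = c :: r3 t := by rw [r3, repPy_neg _ _ _ _ h]; rfl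
lemma r4_pass (c : Char) (t : List Char) (h : List.isPrefixOf ['&','l','t',';'] (c :: t) = false) :
    r4 (c :: t) = c :: r4 t := by rw [r4, repPy_neg _ _ _ _ h]; rfl
lemma r5_pass (c : Char) (t : List Char) (h : List.isPrefixOf ['&','a','m','p',';'] (c :: t) = false) :
    r5 (c :: t) = c :: r5 t := by rw [r5, repPy_neg _ _ _ _ h]; rfl

lemma bool_of_not_prefix (l x : List Char) (h : ¬ l <+: x) : List.isPrefixOf l x = false := by
  rw [← Bool.not_eq_true, List.isPrefixOf_iff_prefix]
  exact h

lemma not_prefix_chain (Q : List Char) (h1 : '\'' ∉ Q) (h2 : '"' ∉ Q) (h3 : '>' ∉ Q)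
    (h4 : '<' ∉ Q) (t : List Char) (h : ¬ Q <+: t) :
    ¬ Q <+: r1 t ∧ ¬ Q <+: r2 (r1 t) ∧ ¬ Q <+: r3 (r2 (r1 t)) ∧ ¬ Q <+: r4 (r3 (r2 (r1 t))) := by
  have a1 : ¬ Q <+: r1 t := not_prefix_repPy _ _ t.length t Q le_rfl h1 h
  have a2 : ¬ Q <+: r2 (r1 t) := not_prefix_repPy _ _ (r1 t).length (r1 t) Q le_rfl h2 a1
  have a3 : ¬ Q <+: r3 (r2 (r1 t)) :=
    not_prefix_repPy _ _ (r2 (r1 t)).length (r2 (r1 t)) Q le_rfl h3 a2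
  have a4 : ¬ Q <+: r4 (r3 (r2 (r1 t))) :=
    not_prefix_repPy _ _ (r3 (r2 (r1 t))).length (r3 (r2 (r1 t))) Q le_rfl h4 a3
  exact ⟨a1, a2, a3, a4⟩

-- the five matched cases of the combined tower
lemma case_p1 (t : List Char) :
    r5 (r4 (r3 (r2 (r1 ('&'::'#'::'3'::'9'::';'::t))))) = '\'' :: r5 (r4 (r3 (r2 (r1 t)))) := by
  rw [r1_match, r2_pass '\'' _ rfl, r3_pass '\'' _ rfl, r4_pass '\'' _ rfl, r5_pass '\'' _ rfl]

lemma case_p2 (t : List Char) :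
    r5 (r4 (r3 (r2 (r1 ('&'::'q'::'u'::'o'::'t'::';'::t))))) = '"' :: r5 (r4 (r3 (r2 (r1 t)))) := by
  rw [r1_pass '&' _ rfl, r1_pass 'q' _ rfl, r1_pass 'u' _ rfl, r1_pass 'o' _ rfl,
    r1_pass 't' _ rfl, r1_pass ';' _ rfl, r2_match, r3_pass '"' _ rfl, r4_pass '"' _ rfl,
    r5_pass '"' _ rfl]

lemma case_p3 (t : List Char) :
    r5 (r4 (r3 (r2 (r1 ('&'::'g'::'t'::';'::t))))) = '>' :: r5 (r4 (r3 (r2 (r1 t)))) := by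
  rw [r1_pass '&' _ rfl, r1_pass 'g' _ rfl, r1_pass 't' _ rfl, r1_pass ';' _ rfl,
    r2_pass '&' _ rfl, r2_pass 'g' _ rfl, r2_pass 't' _ rfl, r2_pass ';' _ rfl,
    r3_match, r4_pass '>' _ rfl, r5_pass '>' _ rfl]

lemma case_p4 (t : List Char) :
    r5 (r4 (r3 (r2 (r1 ('&'::'l'::'t'::';'::t))))) = '<' :: r5 (r4 (r3 (r2 (r1 t)))) := by
  rw [r1_pass '&' _ rfl, r1_pass 'l' _ rfl, r1_pass 't' _ rfl, r1_pass ';' _ rfl,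
    r2_pass '&' _ rfl, r2_pass 'l' _ rfl, r2_pass 't' _ rfl, r2_pass ';' _ rfl,
    r3_pass '&' _ rfl, r3_pass 'l' _ rfl, r3_pass 't' _ rfl, r3_pass ';' _ rfl,
    r4_match, r5_pass '<' _ rfl]

lemma case_p5 (t : List Char) :
    r5 (r4 (r3 (r2 (r1 ('&'::'a'::'m'::'p'::';'::t))))) = '&' :: r5 (r4 (r3 (r2 (r1 t)))) := by
  rw [r1_pass '&' _ rfl, r1_pass 'a' _ rfl, r1_pass 'm' _ rfl, r1_pass 'p' _ rfl, r1_pass ';' _ rfl,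
    r2_pass '&' _ rfl, r2_pass 'a' _ rfl, r2_pass 'm' _ rfl, r2_pass 'p' _ rfl, r2_pass ';' _ rfl,
    r3_pass '&' _ rfl, r3_pass 'a' _ rfl, r3_pass 'm' _ rfl, r3_pass 'p' _ rfl, r3_pass ';' _ rfl,
    r4_pass '&' _ rfl, r4_pass 'a' _ rfl, r4_pass 'm' _ rfl, r4_pass 'p' _ rfl, r4_pass ';' _ rfl,
    r5_match]

lemma case_else (c : Char) (t : List Char)
    (h1 : ¬ ['&','#','3','9',';'] <+: c::t)
    (h2 : ¬ ['&','q','u','o','t',';'] <+: c::t)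
    (h3 : ¬ ['&','g','t',';'] <+: c::t)
    (h4 : ¬ ['&','l','t',';'] <+: c::t)
    (h5 : ¬ ['&','a','m','p',';'] <+: c::t) :
    r5 (r4 (r3 (r2 (r1 (c::t))))) = c :: r5 (r4 (r3 (r2 (r1 t)))) := by
  have key : ∀ Q : List Char, '\'' ∉ Q → '"' ∉ Q → '>' ∉ Q → '<' ∉ Q →
      ¬ ('&'::Q) <+: c::t →
      (¬ ('&'::Q) <+: c :: r1 t ∧ ¬ ('&'::Q) <+: c :: r2 (r1 t) ∧
       ¬ ('&'::Q) <+: c :: r3 (r2 (r1 t)) ∧ ¬ ('&'::Q) <+: c :: r4 (r3 (r2 (r1 t)))) := by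
    intro Q q1 q2 q3 q4 hQ
    by_cases hc : c = '&'
    · subst hc
      have ht : ¬ Q <+: t := fun h => hQ (List.cons_prefix_cons.mpr ⟨rfl, h⟩)
      obtain ⟨a1, a2, a3, a4⟩ := not_prefix_chain Q q1 q2 q3 q4 t ht
      exact ⟨fun h => a1 (List.cons_prefix_cons.mp h).2,
             fun h => a2 (List.cons_prefix_cons.mp h).2,
             fun h => a3 (List.cons_prefix_cons.mp h).2,
             fun h => a4 (List.cons_prefix_cons.mp h).2⟩
    · exact ⟨fun h => hc (List.cons_prefix_cons.mp h).1.symm,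
             fun h => hc (List.cons_prefix_cons.mp h).1.symm,
             fun h => hc (List.cons_prefix_cons.mp h).1.symm,
             fun h => hc (List.cons_prefix_cons.mp h).1.symm⟩
  have k2 := (key ['q','u','o','t',';'] (by decide) (by decide) (by decide) (by decide) h2).1
  have k3 := (key ['g','t',';'] (by decide) (by decide) (by decide) (by decide) h3).2.1
  have k4 := (key ['l','t',';'] (by decide) (by decide) (by decide) (by decide) h4).2.2.1
  have k5 := (key ['a','m','p',';'] (by decide) (by decide) (by decide) (by decide) h5).2.2.2
  rw [r1_pass c t (bool_of_not_prefix _ _ h1),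
      r2_pass c _ (bool_of_not_prefix _ _ k2),
      r3_pass c _ (bool_of_not_prefix _ _ k3),
      r4_pass c _ (bool_of_not_prefix _ _ k4),
      r5_pass c _ (bool_of_not_prefix _ _ k5)]

lemma scan_p1 (t : List Char) : scanEntities ('&'::'#'::'3'::'9'::';'::t) = '\'' :: scanEntities t := rfl
lemma scan_p2 (t : List Char) : scanEntities ('&'::'q'::'u'::'o'::'t'::';'::t) = '"' :: scanEntities t := rfl
lemma scan_p3 (t : List Char) : scanEntities ('&'::'g'::'t'::';'::t) = '>' :: scanEntities t := rfl
lemma scan_p4 (t : List Char) : scanEntities ('&'::'l'::'t'::';'::t) = '<' :: scanEntities t := rfl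
lemma scan_p5 (t : List Char) : scanEntities ('&'::'a'::'m'::'p'::';'::t) = '&' :: scanEntities t := rfl
lemma scan_nil : scanEntities [] = [] := rfl
lemma tower_nil : r5 (r4 (r3 (r2 (r1 [])))) = [] := by
  simp only [r1, r2, r3, r4, r5, repPy_nil]

lemma scanEntities_else (c : Char) (t : List Char)
    (h1 : ¬ ['&','#','3','9',';'] <+: c::t)
    (h2 : ¬ ['&','q','u','o','t',';'] <+: c::t)
    (h3 : ¬ ['&','g','t',';'] <+: c::t)
    (h4 : ¬ ['&','l','t',';'] <+: c::t)
    (h5 : ¬ ['&','a','m','p',';'] <+: c::t) :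
    scanEntities (c :: t) = c :: scanEntities t := by
  rw [scanEntities.eq_def]
  split
  · rename_i t1 heq
    exact absurd ⟨t1, heq.symm⟩ h1
  · rename_i t1 heq
    exact absurd ⟨t1, heq.symm⟩ h2
  · rename_i t1 heq
    exact absurd ⟨t1, heq.symm⟩ h3
  · rename_i t1 heq
    exact absurd ⟨t1, heq.symm⟩ h4
  · rename_i t1 heq
    exact absurd ⟨t1, heq.symm⟩ h5
  · rename_i x c2 t2 n1 n2 n3 n4 n5 heq
    injection heq with hc ht
    rw [hc, ht]
  · rename_i x heq
    exact absurd heq (by simp)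

lemma main_lemma : ∀ n cs, cs.length ≤ n → r5 (r4 (r3 (r2 (r1 cs)))) = scanEntities cs := by
  intro n
  induction n with
  | zero =>
    intro cs hcs
    have : cs = [] := List.eq_nil_of_length_eq_zero (Nat.le_zero.mp hcs)
    subst this
    rw [tower_nil, scan_nil]
  | succ n ih =>
    intro cs hcs
    by_cases h1 : ['&','#','3','9',';'] <+: cs
    · obtain ⟨t', rfl⟩ := h1
      rw [show (['&','#','3','9',';'] ++ t' : List Char) = '&'::'#'::'3'::'9'::';'::t' from rfl,
        case_p1, scan_p1, ih t' (by simp at hcs ⊢; omega)]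
    · by_cases h2 : ['&','q','u','o','t',';'] <+: cs
      · obtain ⟨t', rfl⟩ := h2
        rw [show (['&','q','u','o','t',';'] ++ t' : List Char) = '&'::'q'::'u'::'o'::'t'::';'::t' from rfl,
          case_p2, scan_p2, ih t' (by simp at hcs ⊢; omega)]
      · by_cases h3 : ['&','g','t',';'] <+: cs
        · obtain ⟨t', rfl⟩ := h3
          rw [show (['&','g','t',';'] ++ t' : List Char) = '&'::'g'::'t'::';'::t' from rfl,
            case_p3, scan_p3, ih t' (by simp at hcs ⊢; omega)]
        · by_cases h4 : ['&','l','t',';'] <+: cs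
          · obtain ⟨t', rfl⟩ := h4
            rw [show (['&','l','t',';'] ++ t' : List Char) = '&'::'l'::'t'::';'::t' from rfl,
              case_p4, scan_p4, ih t' (by simp at hcs ⊢; omega)]
          · by_cases h5 : ['&','a','m','p',';'] <+: cs
            · obtain ⟨t', rfl⟩ := h5
              rw [show (['&','a','m','p',';'] ++ t' : List Char) = '&'::'a'::'m'::'p'::';'::t' from rfl,
                case_p5, scan_p5, ih t' (by simp at hcs ⊢; omega)]
            · cases cs with
              | nil => rw [tower_nil, scan_nil]
              | cons c t =>
                rw [case_else c t h1 h2 h3 h4 h5, scanEntities_else c t h1 h2 h3 h4 h5,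
                  ih t (by simp at hcs ⊢; omega)]

-- ===== VERDICT (by name: the statement is the Claim_ definition above) =====
theorem html_to_ascii_spec : Claim_equal_html_to_ascii := by
  intro s _
  unfold Spec_html_to_ascii html_to_ascii html_to_ascii_alt
  simp only [List.foldl_cons, List.foldl_nil, PySem.Str.replace, String.toList_ofList]
  rw [show ("&#39;" : String).toList = ['&','#','3','9',';'] from rfl,
      show ("&quot;" : String).toList = ['&','q','u','o','t',';'] from rfl,
      show ("&gt;" : String).toList = ['&','g','t',';'] from rfl,
      show ("&lt;" : String).toList = ['&','l','t',';'] from rfl,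
      show ("&amp;" : String).toList = ['&','a','m','p',';'] from rfl,
      show ("'" : String).toList = ['\''] from rfl,
      show ("\"" : String).toList = ['"'] from rfl,
      show (">" : String).toList = ['>'] from rfl,
      show ("<" : String).toList = ['<'] from rfl,
      show ("&" : String).toList = ['&'] from rfl]
  rw [replace_eq_repPy _ _ _ (by decide), replace_eq_repPy _ _ _ (by decide),
      replace_eq_repPy _ _ _ (by decide), replace_eq_repPy _ _ _ (by decide),
      replace_eq_repPy _ _ _ (by decide)]
  exact congrArg String.ofList (main_lemma s.toList.length s.toList le_rfl)
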